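-- pv_equiv track=rewrite | github.com/yaolinxia/algorithm | baidu/6.py | find_good
-- ===== SOURCE A (Python) =====
-- def find_good(n, likes):
--     opt = [0 for i in range(n)]
--     arts = [0 for i in range(n)]
--     opt[0], opt[1] = likes[0], likes[1]
--     arts[0], arts[1] = 1, 1
--     for i in range(2, n):
--         num1 = opt[i-1]
--         num2 = opt[i-2]
--         if num1 >= num2:
--             opt[i] = num1
--             arts[i] = arts[i-1]
--         else:
--             opt[i] = num2
--             arts[i] = arts[i-2] + 1
--     return opt[-1], arts[-1]
-- ===== SOURCE B (Python) =====
-- def find_good(n, likes):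
--     a, b = likes[0], likes[1]
--     if n == 2:
--         return b, 1
--     return max(a, b), (1 if b >= a else 2)
-- ===== Notes on version B (the rewrite author's own statement) =====
-- stated objective: faster
-- what changed: The DP arrays collapse: opt stabilises at max(likes[0],likes[1]) and arts at 1-or-2 after index 2, so B replaces the whole O(n) loop and the two length-n arrays with a constant-time closed form (n==2 returns (likes[1],1), otherwise (max(likes[0],likes[1]), 1 if likes[1]>=likes[0] else 2)).
import Mathlib
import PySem

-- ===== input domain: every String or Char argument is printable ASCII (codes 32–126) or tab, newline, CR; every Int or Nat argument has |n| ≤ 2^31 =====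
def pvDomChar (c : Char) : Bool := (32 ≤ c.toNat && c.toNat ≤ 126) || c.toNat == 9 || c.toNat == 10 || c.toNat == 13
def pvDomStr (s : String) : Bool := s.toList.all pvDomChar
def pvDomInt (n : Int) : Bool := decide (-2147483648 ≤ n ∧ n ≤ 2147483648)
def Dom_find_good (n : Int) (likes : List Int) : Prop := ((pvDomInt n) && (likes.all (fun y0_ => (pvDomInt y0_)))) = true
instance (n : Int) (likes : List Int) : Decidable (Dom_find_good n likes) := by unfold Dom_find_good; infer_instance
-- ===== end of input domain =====

-- B replaces A's O(n) DP loop with an O(1) closed form (the DP values stabilise after index 2).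

-- ===== PORT A =====
-- literal transcription of A's 'for i in range(2, n)' loop over the two Python lists (arrays);
-- indices are hand-ported: inside the loop 2 ≤ i < n = len(opt) = len(arts), so Python's
-- opt[i], opt[i-1], opt[i-2] are exactly the in-range reads/writes .getD/.setIfInBounds perform.
def findGoodLoop (n : Int) (i : Int) (opt arts : Array Int) : Array Int × Array Int :=
  if _h : i < n then
    let num1 := opt.getD (i - 1).toNat 0
    let num2 := opt.getD (i - 2).toNat 0
    if num1 ≥ num2 then
      findGoodLoop n (i + 1) (opt.setIfInBounds i.toNat num1)
        (arts.setIfInBounds i.toNat (arts.getD (i - 1).toNat 0))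
    else
      findGoodLoop n (i + 1) (opt.setIfInBounds i.toNat num2)
        (arts.setIfInBounds i.toNat (arts.getD (i - 2).toNat 0 + 1))
  else (opt, arts)
termination_by (n - i).toNat
decreasing_by all_goals omega

-- opt[-1]/arts[-1] at the end are hand-ported as the last cell (size - 1): exact, since under
-- Pre_ the arrays are nonempty; writes opt[0], opt[1] (Python raises IndexError when n < 2,
-- excluded by Pre_) are the same setIfInBounds writes.
def find_good (n : Int) (likes : List Int) : Int × Int :=
  let opt0 := Array.replicate n.toNat (0 : Int)
  let arts0 := Array.replicate n.toNat (0 : Int)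
  let opt1 := (opt0.setIfInBounds 0 (PySem.List.pyGetD likes 0 0)).setIfInBounds 1
    (PySem.List.pyGetD likes 1 0)
  let arts1 := (arts0.setIfInBounds 0 1).setIfInBounds 1 1
  let p := findGoodLoop n 2 opt1 arts1
  (p.1.getD (p.1.size - 1) 0, p.2.getD (p.2.size - 1) 0)

-- ===== PORT B =====
def find_good_alt (n : Int) (likes : List Int) : Int × Int :=
  let a := PySem.List.pyGetD likes 0 0
  let b := PySem.List.pyGetD likes 1 0
  if n = 2 then (b, 1)
  else (max a b, if b ≥ a then 1 else 2)

-- ===== PRECONDITION & SPEC =====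
-- Pre_ excludes exactly the inputs where A raises IndexError: n < 2 (the opt[1] write) or len(likes) < 2 (the likes[1] read).
def Pre_find_good (n : Int) (likes : List Int) : Prop := 2 ≤ n ∧ 2 ≤ likes.length
instance (n : Int) (likes : List Int) : Decidable (Pre_find_good n likes) := by
  unfold Pre_find_good; infer_instance

def pvWitness_find_good : Int × List Int := (4, [3, 1, 2, 5])

def Spec_find_good (n : Int) (likes : List Int) (out : Int × Int) : Prop := out = find_good_alt n likes
instance (n : Int) (likes : List Int) (out : Int × Int) : Decidable (Spec_find_good n likes out) := by
  unfold Spec_find_good; infer_instance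

-- ===== CLAIM (what is proved, stated in full; the proofs are below) =====
def Claim_equal_find_good : Prop := ∀ (n : Int) (likes : List Int), Dom_find_good n likes → Pre_find_good n likes → Spec_find_good n likes (find_good n likes)

-- ===== LEMMAS AND PROOFS =====

-- reading a just-written cell, with Python-side (nonnegative) Int indices
theorem agetset (a : Array Int) (j m v : Int) (hj0 : 0 ≤ j) (hj : j < (a.size : Int))
    (hm0 : 0 ≤ m) :
    (a.setIfInBounds j.toNat v).getD m.toNat 0 = if m = j then v else a.getD m.toNat 0 := by
  by_cases hm : m.toNat < a.size
  · have h1 : (a.setIfInBounds j.toNat v).getD m.toNat 0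
        = (a.setIfInBounds j.toNat v)[m.toNat]'(by simpa [Array.size_setIfInBounds] using hm) := by
      simp [Array.getD, Array.size_setIfInBounds, hm]
    rw [h1, Array.getElem_setIfInBounds]
    by_cases h : m = j
    · simp [h]
    · have h' : ¬ j.toNat = m.toNat := by omega
      simp [h, h', Array.getD, hm]
    · exact hm
  · have h : ¬ m = j := by omega
    simp [Array.getD, Array.size_setIfInBounds, hm, h]

-- the same fact with Nat-literal indices (initialisation cells)
theorem getD_setIB (a : Array Int) (j : Nat) (v : Int) (m : Nat) (hj : j < a.size) :
    (a.setIfInBounds j v).getD m 0 = if m = j then v else a.getD m 0 := by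
  have h := agetset a j m v (by omega) (by exact_mod_cast hj) (by omega)
  simp only [Int.toNat_natCast, Nat.cast_inj] at h
  exact h

-- Loop invariant: once opt[i-1] = M (the running maximum), opt[i-2] ≤ M and arts[i-1] = C,
-- every later iteration takes the first branch and copies M and C forward.
theorem findGoodLoop_inv (n : Int) (k : Nat) :
    ∀ (i : Int) (opt arts : Array Int) (M C : Int),
      (n - i).toNat = k → 3 ≤ i → i ≤ n →
      opt.size = n.toNat → arts.size = n.toNat →
      opt.getD (i - 1).toNat 0 = M →
      opt.getD (i - 2).toNat 0 ≤ M →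
      arts.getD (i - 1).toNat 0 = C →
      (findGoodLoop n i opt arts).1.size = n.toNat ∧
      (findGoodLoop n i opt arts).2.size = n.toNat ∧
      (findGoodLoop n i opt arts).1.getD (n - 1).toNat 0 = M ∧
      (findGoodLoop n i opt arts).2.getD (n - 1).toNat 0 = C := by
  induction k with
  | zero =>
    intro i opt arts M C hk h3 hle hlo hla h1 h2 hc
    have hin : i = n := by omega
    subst hin
    rw [findGoodLoop]
    simp only [lt_irrefl, dite_false]
    exact ⟨hlo, hla, h1, hc⟩
  | succ k ih =>
    intro i opt arts M C hk h3 hle hlo hla h1 h2 hc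
    have hlt : i < n := by omega
    have hiL : i < (opt.size : Int) := by omega
    have hiL' : i < (arts.size : Int) := by omega
    rw [findGoodLoop]
    simp only [hlt, dite_true, h1, hc, ge_iff_le, h2, if_true]
    refine ih (i + 1) _ _ M C (by omega) (by omega) (by omega)
      (by rw [Array.size_setIfInBounds]; exact hlo)
      (by rw [Array.size_setIfInBounds]; exact hla) ?_ ?_ ?_
    · rw [show i + 1 - 1 = i by ring, agetset opt i i M (by omega) hiL (by omega)]; simp
    · rw [show i + 1 - 2 = i - 1 by ring, agetset opt i (i - 1) M (by omega) hiL (by omega)]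
      split
      · exact le_refl M
      · rw [h1]
    · rw [show i + 1 - 1 = i by ring, agetset arts i i C (by omega) hiL' (by omega)]; simp

-- ===== VERDICT (by name: the statement is the Claim_ definition above) =====
theorem find_good_spec : Claim_equal_find_good := by
  intro n likes _ hpre
  obtain ⟨hn, hl⟩ := hpre
  unfold Spec_find_good find_good find_good_alt
  simp only []
  set a := PySem.List.pyGetD likes 0 0 with ha
  set b := PySem.List.pyGetD likes 1 0 with hb
  set opt1 := ((Array.replicate n.toNat (0:Int)).setIfInBounds 0 a).setIfInBounds 1 b with hopt1
  set arts1 := ((Array.replicate n.toNat (0:Int)).setIfInBounds 0 1).setIfInBounds 1 1 with harts1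
  have hlo : opt1.size = n.toNat := by
    rw [hopt1, Array.size_setIfInBounds, Array.size_setIfInBounds, Array.size_replicate]
  have hla : arts1.size = n.toNat := by
    rw [harts1, Array.size_setIfInBounds, Array.size_setIfInBounds, Array.size_replicate]
  have hg1 : opt1.getD (1:Int).toNat 0 = b := by
    show opt1.getD 1 0 = b
    rw [hopt1, getD_setIB _ 1 b 1 (by rw [Array.size_setIfInBounds, Array.size_replicate]; omega)]
    simp
  have hg0 : opt1.getD (0:Int).toNat 0 = a := by
    show opt1.getD 0 0 = a
    rw [hopt1, getD_setIB _ 1 b 0 (by rw [Array.size_setIfInBounds, Array.size_replicate]; omega), if_neg (by norm_num),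
      getD_setIB _ 0 a 0 (by rw [Array.size_replicate]; omega)]
    simp
  have hga1 : arts1.getD (1:Int).toNat 0 = 1 := by
    show arts1.getD 1 0 = 1
    rw [harts1, getD_setIB _ 1 1 1 (by rw [Array.size_setIfInBounds, Array.size_replicate]; omega)]
    simp
  have hga0 : arts1.getD (0:Int).toNat 0 = 1 := by
    show arts1.getD 0 0 = 1
    rw [harts1, getD_setIB _ 1 1 0 (by rw [Array.size_setIfInBounds, Array.size_replicate]; omega), if_neg (by norm_num),
      getD_setIB _ 0 1 0 (by rw [Array.size_replicate]; omega)]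
    simp
  by_cases h2 : n = 2
  · -- n = 2: the loop body never runs; opt[-1] = likes[1], arts[-1] = 1
    subst h2
    rw [if_pos rfl, findGoodLoop]
    simp only [lt_irrefl, dite_false]
    have e1 : opt1.size - 1 = (1:Int).toNat := by omega
    have e2 : arts1.size - 1 = (1:Int).toNat := by omega
    rw [e1, e2, hg1, hga1]
  · -- n ≥ 3: peel the i = 2 iteration, then the invariant from i = 3
    have hn3 : 3 ≤ n := by omega
    rw [if_neg h2, findGoodLoop]
    simp only [show (2:Int) < n from by omega, dite_true]
    rw [show (2:Int) - 1 = 1 by norm_num, show (2:Int) - 2 = 0 by norm_num, hg1, hg0]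
    have hL2o : (2:Int) < (opt1.size : Int) := by omega
    have hL2a : (2:Int) < (arts1.size : Int) := by omega
    rw [show (2:Int) + 1 = 3 from by norm_num]
    by_cases hba : b ≥ a
    · rw [if_pos hba, if_pos hba]
      have hM : b = max a b := by omega
      obtain ⟨hlo', hla', hv, hw⟩ := findGoodLoop_inv n (n - 3).toNat 3
        (opt1.setIfInBounds (2:Int).toNat b)
        (arts1.setIfInBounds (2:Int).toNat (arts1.getD (1:Int).toNat 0))
        (max a b) 1 (by omega) (by omega) (by omega)
        (by rw [Array.size_setIfInBounds]; exact hlo)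
        (by rw [Array.size_setIfInBounds]; exact hla)
        (by rw [show (3:Int) - 1 = 2 by norm_num,
              agetset opt1 2 2 b (by omega) hL2o (by omega), if_pos rfl]; exact hM)
        (by rw [show (3:Int) - 2 = 1 by norm_num,
              agetset opt1 2 1 b (by omega) hL2o (by omega), if_neg (by norm_num), hg1]; omega)
        (by rw [show (3:Int) - 1 = 2 by norm_num,
              agetset arts1 2 2 _ (by omega) hL2a (by omega), if_pos rfl, hga1])
      have e1 : (findGoodLoop n 3 (opt1.setIfInBounds (2:Int).toNat b)
          (arts1.setIfInBounds (2:Int).toNat (arts1.getD (1:Int).toNat 0))).1.size - 1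
          = (n - 1).toNat := by omega
      have e2 : (findGoodLoop n 3 (opt1.setIfInBounds (2:Int).toNat b)
          (arts1.setIfInBounds (2:Int).toNat (arts1.getD (1:Int).toNat 0))).2.size - 1
          = (n - 1).toNat := by omega
      rw [e1, e2, hv, hw]
    · rw [if_neg hba, if_neg hba]
      have hM : a = max a b := by omega
      obtain ⟨hlo', hla', hv, hw⟩ := findGoodLoop_inv n (n - 3).toNat 3
        (opt1.setIfInBounds (2:Int).toNat a)
        (arts1.setIfInBounds (2:Int).toNat (arts1.getD (0:Int).toNat 0 + 1))
        (max a b) 2 (by omega) (by omega) (by omega)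
        (by rw [Array.size_setIfInBounds]; exact hlo)
        (by rw [Array.size_setIfInBounds]; exact hla)
        (by rw [show (3:Int) - 1 = 2 by norm_num,
              agetset opt1 2 2 a (by omega) hL2o (by omega), if_pos rfl]; exact hM)
        (by rw [show (3:Int) - 2 = 1 by norm_num,
              agetset opt1 2 1 a (by omega) hL2o (by omega), if_neg (by norm_num), hg1]; omega)
        (by rw [show (3:Int) - 1 = 2 by norm_num,
              agetset arts1 2 2 _ (by omega) hL2a (by omega), if_pos rfl, hga0]; norm_num)
      have e1 : (findGoodLoop n 3 (opt1.setIfInBounds (2:Int).toNat a)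
          (arts1.setIfInBounds (2:Int).toNat (arts1.getD (0:Int).toNat 0 + 1))).1.size - 1
          = (n - 1).toNat := by omega
      have e2 : (findGoodLoop n 3 (opt1.setIfInBounds (2:Int).toNat a)
          (arts1.setIfInBounds (2:Int).toNat (arts1.getD (0:Int).toNat 0 + 1))).2.size - 1
          = (n - 1).toNat := by omega
      rw [e1, e2, hv, hw]
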